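-- pv_equiv track=rewrite | github.com/MattiaBaldinetti/PythonExercises | Lezione_4.py | trova_finale_max2
-- ===== SOURCE A (Python) =====
-- def trova_finale_max2(lista):
--     diz = {}
--     massimo = 0
--     for parola in lista:
--         lettera = parola[-1]
--         diz[lettera] = diz.get(lettera, 0) + 1
--         if diz[lettera] > massimo:
--             lettera_massimo = lettera
--             massimo = diz[lettera]
--     return lettera_massimo
-- ===== SOURCE B (Python) =====
-- def trova_finale_max2(lista):
--     diz = {}
--     for p in lista:
--         diz[p[-1]] = diz.get(p[-1], 0) + 1
--     M = max(diz.values(), default=0)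
--     conta = {}
--     for p in lista:
--         l = p[-1]
--         conta[l] = conta.get(l, 0) + 1
--         if conta[l] == M:
--             lettera_massimo = l
--             break
--     return lettera_massimo
-- ===== Notes on version B (the rewrite author's own statement) =====
-- stated objective: alternative
-- what changed: A maintains a running maximum and candidate letter inside its single counting loop; B splits the work into a counting pass, a max over the count values, and a second locate pass that stops at the first letter whose running count reaches the max.
import Mathlib
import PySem

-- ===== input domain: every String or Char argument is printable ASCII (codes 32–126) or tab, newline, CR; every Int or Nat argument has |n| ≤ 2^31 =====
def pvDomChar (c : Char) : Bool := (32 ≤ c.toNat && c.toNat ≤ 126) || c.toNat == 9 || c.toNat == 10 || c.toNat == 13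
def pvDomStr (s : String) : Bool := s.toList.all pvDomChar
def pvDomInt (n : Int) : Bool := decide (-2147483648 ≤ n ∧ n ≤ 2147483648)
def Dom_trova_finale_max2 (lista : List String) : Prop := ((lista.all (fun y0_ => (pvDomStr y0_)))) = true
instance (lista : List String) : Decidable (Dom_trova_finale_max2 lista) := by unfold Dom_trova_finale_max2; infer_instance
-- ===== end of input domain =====

-- B replaces A's single running-max loop by a count pass, a max over the counts, and a locate pass
-- stopping at the first letter whose running count reaches the max (alternative decomposition, same cost).


-- ===== PORT A =====
-- one loop: count, and update (massimo, lettera_massimo) whenever the new count exceeds massimo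
def stepA (st : PySem.Dict Char Int × Int × Option Char) (lettera : Char) :
    PySem.Dict Char Int × Int × Option Char :=
  let diz := st.1.insert lettera (st.1.getD lettera 0 + 1)
  if diz.getD lettera 0 > st.2.1 then (diz, diz.getD lettera 0, some lettera)
  else (diz, st.2.1, st.2.2)

def trova_finale_max2 (lista : List String) : String :=
  let r := lista.foldl (fun st parola =>
    match PySem.Str.pyGet? parola (-1) with   -- parola[-1]; none = IndexError, excluded by Pre_
    | none => st
    | some lettera => stepA st lettera) (PySem.Dict.empty, 0, none)
  match r.2.2 with
  | some c => String.ofList [c]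
  | none => ""   -- UnboundLocalError on the empty list, excluded by Pre_

-- ===== PORT B =====
-- locate pass: first letter whose running count equals M (the `break` loop)
def locB (conta : PySem.Dict Char Int) (M : Int) : List String → Option Char
  | [] => none
  | p :: t =>
    match PySem.Str.pyGet? p (-1) with
    | none => none   -- IndexError, excluded by Pre_
    | some l =>
      let conta' := conta.insert l (conta.getD l 0 + 1)
      if conta'.getD l 0 = M then some l else locB conta' M t

def trova_finale_max2_alt (lista : List String) : String :=
  let diz := lista.foldl (fun d p =>
    match PySem.Str.pyGet? p (-1) with
    | none => d
    | some l => d.insert l (d.getD l 0 + 1)) PySem.Dict.empty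
  let M := (PySem.List.max? diz.values (fun v => v)).getD 0
  match locB PySem.Dict.empty M lista with
  | some c => String.ofList [c]
  | none => ""   -- UnboundLocalError on the empty list, excluded by Pre_

-- ===== PRECONDITION & SPEC =====
-- Pre_ excludes exactly the inputs where A raises: the empty list (UnboundLocalError) and
-- lists containing an empty string (IndexError on parola[-1]).
def Pre_trova_finale_max2 (lista : List String) : Prop :=
  lista ≠ [] ∧ ∀ s ∈ lista, s ≠ ""
instance (lista : List String) : Decidable (Pre_trova_finale_max2 lista) := by
  unfold Pre_trova_finale_max2; infer_instance
def pvWitness_trova_finale_max2 : List String := (["ab", "cb", "a"])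

def Spec_trova_finale_max2 (lista : List String) (out : String) : Prop := out = trova_finale_max2_alt lista
instance (lista : List String) (out : String) : Decidable (Spec_trova_finale_max2 lista out) := by unfold Spec_trova_finale_max2; infer_instance

-- ===== CLAIM (what is proved, stated in full; the proofs are below) =====
def Claim_equal_trova_finale_max2 : Prop := ∀ (lista : List String), Dom_trova_finale_max2 lista → Pre_trova_finale_max2 lista → Spec_trova_finale_max2 lista (trova_finale_max2 lista)

-- ===== LEMMAS AND PROOFS =====

-- char-level versions of the loops, over the list of last letters
def cnt (cs : List Char) : PySem.Dict Char Int :=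
  cs.foldl (fun d c => d.insert c (d.getD c 0 + 1)) PySem.Dict.empty

def foldA (cs : List Char) : PySem.Dict Char Int × Int × Option Char :=
  cs.foldl stepA (PySem.Dict.empty, 0, none)

def firstReach (d : PySem.Dict Char Int) (M : Int) : List Char → Option Char
  | [] => none
  | c :: t =>
    let n := d.getD c 0 + 1
    if n = M then some c else firstReach (d.insert c n) M t

-- last character of a nonempty string
def lastc (s : String) : Char := s.toList.getLastD 'a'

theorem pyGet_last (s : String) (h : s ≠ "") :
    PySem.Str.pyGet? s (-1) = some (lastc s) := by
  have hl : s.toList ≠ [] := by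
    simpa using (fun hh => h (by exact String.toList_injective (by simpa using hh)))
  simp only [PySem.Str.pyGet?, PySem.Chars.pyGet?_eq_listPyGet?, PySem.List.pyGet?_neg_one, lastc,
    List.getLastD_eq_getLast?]
  cases e : s.toList.getLast? with
  | none => exact absurd (List.getLast?_eq_none_iff.mp e) hl
  | some c => simp

-- A's string fold = char fold over the last letters
theorem foldA_bridge (lista : List String) (h : ∀ s ∈ lista, s ≠ "")
    (st : PySem.Dict Char Int × Int × Option Char) :
    lista.foldl (fun st parola =>
      match PySem.Str.pyGet? parola (-1) with
      | none => st
      | some lettera => stepA st lettera) st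
    = (lista.map lastc).foldl stepA st := by
  induction lista generalizing st with
  | nil => rfl
  | cons p t ih =>
    simp only [List.foldl, List.map]
    rw [pyGet_last p (h p (by simp))]
    exact ih (fun s hs => h s (by simp [hs])) _

theorem cnt_bridge (lista : List String) (h : ∀ s ∈ lista, s ≠ "")
    (d : PySem.Dict Char Int) :
    lista.foldl (fun d p =>
      match PySem.Str.pyGet? p (-1) with
      | none => d
      | some l => d.insert l (d.getD l 0 + 1)) d
    = (lista.map lastc).foldl (fun d c => d.insert c (d.getD c 0 + 1)) d := by
  induction lista generalizing d with
  | nil => rfl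
  | cons p t ih =>
    simp only [List.foldl, List.map]
    rw [pyGet_last p (h p (by simp))]
    exact ih (fun s hs => h s (by simp [hs])) _

theorem locB_bridge (lista : List String) (h : ∀ s ∈ lista, s ≠ "")
    (d : PySem.Dict Char Int) (M : Int) :
    locB d M lista = firstReach d M (lista.map lastc) := by
  induction lista generalizing d with
  | nil => rfl
  | cons p t ih =>
    have hp := pyGet_last p (h p (by simp))
    simp only [locB, List.map, firstReach, hp, PySem.Dict.getD_insert_self]
    split
    · rfl
    · exact ih (fun s hs => h s (by simp [hs])) _

-- first component of A's fold is the counting fold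
theorem foldA_fst (cs : List Char) (st : PySem.Dict Char Int × Int × Option Char) :
    (cs.foldl stepA st).1 = cs.foldl (fun d c => d.insert c (d.getD c 0 + 1)) st.1 := by
  induction cs generalizing st with
  | nil => rfl
  | cons c t ih =>
    simp only [List.foldl]
    rw [ih]
    congr 1
    simp only [stepA]
    split <;> rfl

theorem firstReach_append (d : PySem.Dict Char Int) (M : Int) (cs cs' : List Char) :
    firstReach d M (cs ++ cs')
    = match firstReach d M cs with
      | some x => some x
      | none => firstReach (cs.foldl (fun d c => d.insert c (d.getD c 0 + 1)) d) M cs' := by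
  induction cs generalizing d with
  | nil => simp [firstReach]
  | cons c t ih =>
    simp only [List.cons_append, firstReach, List.foldl]
    split
    · rfl
    · exact ih _

theorem firstReach_none (d : PySem.Dict Char Int) (M : Int) (cs : List Char)
    (h : ∀ x ∈ cs, d.getD x 0 + cs.count x < M) :
    firstReach d M cs = none := by
  induction cs generalizing d with
  | nil => rfl
  | cons c t ih =>
    have hc := h c (by simp)
    simp only [List.count_cons, beq_self_eq_true, if_true] at hc
    simp only [firstReach]
    rw [if_neg (by push_cast at hc ⊢; omega)]
    apply ih
    intro x hx
    by_cases hxc : x = c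
    · subst hxc
      rw [PySem.Dict.getD_insert_self]
      have := h x (by simp)
      simp only [List.count_cons, beq_self_eq_true, if_true] at this
      push_cast at this ⊢
      omega
    · rw [PySem.Dict.getD_insert_of_ne _ _ _ hxc]
      have := h x (by simp [hx])
      simp only [List.count_cons] at this
      rw [if_neg (by simpa using fun e => hxc e.symm)] at this
      simpa using this

theorem cnt_getD (cs : List Char) (x : Char) :
    (cnt cs).getD x 0 = (cs.count x : Int) := by
  simp [cnt, PySem.Dict.getD_foldl_insert_add_one]

theorem stepA_eq (st : PySem.Dict Char Int × Int × Option Char) (c : Char) :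
    stepA st c = (st.1.insert c (st.1.getD c 0 + 1),
      if st.1.getD c 0 + 1 > st.2.1 then (st.1.getD c 0 + 1, some c) else (st.2.1, st.2.2)) := by
  by_cases h : st.1.getD c 0 + 1 > st.2.1
  · simp [stepA, PySem.Dict.getD_insert_self, h]
  · simp [stepA, PySem.Dict.getD_insert_self, h]

-- the main invariant of A's loop
theorem mainA (cs : List Char) :
    (∀ x, (cs.count x : Int) ≤ (foldA cs).2.1)
    ∧ (cs = [] → (foldA cs).2.1 = 0)
    ∧ (cs ≠ [] → ∃ x ∈ cs, (cs.count x : Int) = (foldA cs).2.1)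
    ∧ (foldA cs).2.2 = firstReach PySem.Dict.empty (foldA cs).2.1 cs
    ∧ ((foldA cs).2.2 = none ↔ cs = []) := by
  induction cs using List.reverseRecOn with
  | nil =>
    exact ⟨by intro x; simp [foldA], fun _ => rfl, by simp, rfl, by simp [foldA]⟩
  | append_singleton t c ih =>
    obtain ⟨hub, hz, hat, hfr, hnone⟩ := ih
    have h1 : (foldA t).1 = cnt t := foldA_fst t _
    have hgd : (foldA t).1.getD c 0 = (t.count c : Int) := by rw [h1]; exact cnt_getD t c
    have hcnt_eq : ∀ x, x ≠ c → (t ++ [c]).count x = t.count x := by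
      intro x hxc
      simp [List.count_append, Ne.symm hxc]
    have hcnt_c : (t ++ [c]).count c = t.count c + 1 := by
      simp [List.count_append]
    have hfold : foldA (t ++ [c])
        = ((foldA t).1.insert c ((foldA t).1.getD c 0 + 1),
           if (t.count c : Int) + 1 > (foldA t).2.1 then ((t.count c : Int) + 1, some c)
           else ((foldA t).2.1, (foldA t).2.2)) := by
      rw [foldA, List.foldl_append]
      show stepA (foldA t) c = _
      rw [stepA_eq, hgd]
    by_cases hcase : (t.count c : Int) + 1 > (foldA t).2.1
    · rw [hfold, if_pos hcase]
      refine ⟨?_, by simp, fun _ => ⟨c, by simp, by rw [hcnt_c]; push_cast; ring⟩, ?_, by simp⟩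
      · intro x
        by_cases hxc : x = c
        · rw [hxc, hcnt_c]; push_cast; omega
        · have := hub x
          rw [hcnt_eq x hxc]; push_cast at this ⊢; omega
      · show some c = _
        rw [firstReach_append]
        have hnone' : firstReach PySem.Dict.empty ((t.count c : Int) + 1) t = none := by
          apply firstReach_none
          intro x hx
          have := hub x
          simp only [PySem.Dict.getD_empty]
          push_cast at this ⊢; omega
        rw [hnone']
        show _ = firstReach (cnt t) _ [c]
        rw [firstReach, cnt_getD]
        simp
    · rw [hfold, if_neg hcase]
      have htne : t ≠ [] := by
        intro he
        subst he
        have := hz rfl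
        rw [this] at hcase
        omega
      obtain ⟨x0, hx0m, hx0⟩ := hat htne
      have hx0c : x0 ≠ c := by
        intro he; rw [he] at hx0; rw [hx0] at hcase; exact hcase (by omega)
      refine ⟨?_, by simp, fun _ => ⟨x0, by simp [hx0m], by rw [hcnt_eq x0 hx0c]; exact hx0⟩,
        ?_, ?_⟩
      · intro x
        by_cases hxc : x = c
        · rw [hxc, hcnt_c]; push_cast; push_cast at hcase; omega
        · rw [hcnt_eq x hxc]; exact hub x
      · show (foldA t).2.2 = _
        rw [firstReach_append, ← hfr]
        obtain ⟨y, hy⟩ := Option.ne_none_iff_exists'.mp (fun he => htne (hnone.mp he))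
        rw [hy]
      · constructor
        · intro he
          obtain ⟨y, hy⟩ := Option.ne_none_iff_exists'.mp (fun h => htne (hnone.mp h))
          rw [hy] at he; exact absurd he (by simp)
        · intro he; simp at he

theorem max_values_eq (cs : List Char) (_hne : cs ≠ []) (m : Int)
    (hub : ∀ x, (cs.count x : Int) ≤ m) (hat : ∃ x ∈ cs, (cs.count x : Int) = m) :
    (PySem.List.max? (cnt cs).values (fun v => v)).getD 0 = m := by
  have hcc : cnt cs = PySem.Dict.counter cs := PySem.Dict.foldl_insert_getD_add_one_eq_counter cs
  have hv : (cnt cs).values = (PySem.Set.ofList cs).map (fun k => (cs.count k : Int)) := by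
    rw [hcc]
    simp only [PySem.Dict.values, PySem.Dict.items_counter, List.map_map]
    rfl
  obtain ⟨x0, hx0m, hx0⟩ := hat
  have hmem : m ∈ (cnt cs).values := by
    rw [hv]
    exact List.mem_map.mpr ⟨x0, (PySem.Set.mem_ofList cs x0).mpr hx0m, hx0⟩
  have hvne : (cnt cs).values ≠ [] := by intro h; rw [h] at hmem; simp at hmem
  obtain ⟨v, hvm⟩ := Option.ne_none_iff_exists'.mp
    (fun h => hvne ((PySem.List.max?_eq_none_iff (cnt cs).values (fun v => v)).mp h))
  have hv_mem : v ∈ (cnt cs).values := PySem.List.max?_mem hvm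
  have h1 : v ≤ m := by
    rw [hv] at hv_mem
    obtain ⟨x, hxm, hxe⟩ := List.mem_map.mp hv_mem
    rw [← hxe]; exact hub x
  have h2 : m ≤ v := PySem.List.max?_isMax hvm m hmem
  rw [hvm]
  simp
  omega

-- ===== VERDICT (by name: the statement is the Claim_ definition above) =====
theorem trova_finale_max2_spec : Claim_equal_trova_finale_max2 := by
  unfold Claim_equal_trova_finale_max2
  intro lista _ hpre
  obtain ⟨hlne, hss⟩ := hpre
  unfold Spec_trova_finale_max2
  simp only [trova_finale_max2, trova_finale_max2_alt]
  rw [foldA_bridge lista hss, cnt_bridge lista hss, locB_bridge lista hss]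
  have hcne : lista.map lastc ≠ [] := by simpa using hlne
  obtain ⟨hub, hz, hat, hfr, hnone⟩ := mainA (lista.map lastc)
  have hA : (lista.map lastc).foldl stepA (PySem.Dict.empty, 0, none) = foldA (lista.map lastc) := rfl
  have hC : (lista.map lastc).foldl (fun d c => d.insert c (d.getD c 0 + 1)) PySem.Dict.empty
      = cnt (lista.map lastc) := rfl
  rw [hA, hC, max_values_eq (lista.map lastc) hcne _ hub (hat hcne), ← hfr]
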